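-- pv_equiv track=rewrite | github.com/cole/advent-of-code | 2023/day09.py | extrapolate_backwards
-- ===== SOURCE A (Python) =====
-- import itertools
--
-- def extrapolate_backwards(sequence):
--     level = sequence
--     levels = [level]
--     while not all([v == 0 for v in level]):
--         next_level = [b - a for a, b in itertools.pairwise(level)]
--         level = next_level
--         levels.append(level)
--
--     v = 0
--     for level in reversed(levels):
--         v = level[0] - v
--
--     return v
-- ===== SOURCE B (Python) =====
-- import itertools
--
-- def extrapolate_backwards(sequence):
--     # Recursive finite-difference form: the alternating sign is threaded
--     # through the recursion instead of storing every level and folding back.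
--     if all(v == 0 for v in sequence):
--         return sequence[0]
--     diffs = [b - a for a, b in itertools.pairwise(sequence)]
--     return sequence[0] - extrapolate_backwards(diffs)
-- ===== Notes on version B (the rewrite author's own statement) =====
-- stated objective: simpler
-- what changed: B is a direct recursion on the difference table (head minus the extrapolation of the diffs), with no stored list of levels and no second backward fold over reversed(levels).
import Mathlib
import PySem

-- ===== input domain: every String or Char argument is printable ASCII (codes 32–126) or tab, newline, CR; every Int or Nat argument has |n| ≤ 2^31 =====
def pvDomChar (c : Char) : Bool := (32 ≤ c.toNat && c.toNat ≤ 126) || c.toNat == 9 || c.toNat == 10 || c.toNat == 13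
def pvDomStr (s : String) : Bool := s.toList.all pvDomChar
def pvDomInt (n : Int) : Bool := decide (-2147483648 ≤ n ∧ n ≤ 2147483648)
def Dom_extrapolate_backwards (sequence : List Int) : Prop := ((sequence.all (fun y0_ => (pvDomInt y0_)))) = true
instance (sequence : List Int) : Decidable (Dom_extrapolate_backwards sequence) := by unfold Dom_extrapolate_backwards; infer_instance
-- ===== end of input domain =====

-- B replaces A's two-phase algorithm (collect all difference levels, then fold
-- backwards over reversed(levels)) by a direct recursion on the difference table;
-- return values agree on Pre_ (where the Python A returns).

-- ===== PORT A =====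
-- [b - a for a, b in itertools.pairwise(level)], by structural recursion
def pvDiffs : List Int → List Int
  | a :: b :: rest => (b - a) :: pvDiffs (b :: rest)
  | _ => []

theorem pvDiffs_length (l : List Int) : (pvDiffs l).length = l.length - 1 := by
  induction l with
  | nil => simp [pvDiffs]
  | cons a t ih =>
    cases t with
    | nil => simp [pvDiffs]
    | cons b r => simp [pvDiffs] at ih ⊢; omega

theorem pvDiffs_lt (l : List Int) (h : l ≠ []) : (pvDiffs l).length < l.length := by
  have := pvDiffs_length l
  cases l with
  | nil => exact absurd rfl h
  | cons a t => simp at this ⊢; omega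

theorem all_false_ne_nil (l : List Int) (h : ¬ (l.all (fun v => decide (v = 0)) = true)) :
    l ≠ [] := by
  intro hnil; subst hnil; simp at h

-- the while loop of A: the levels appended after the initial one
def pvBuild (level : List Int) : List (List Int) :=
  if level.all (fun v => decide (v = 0)) then []
  else
    let next := pvDiffs level
    next :: pvBuild next
termination_by level.length
decreasing_by exact pvDiffs_lt level (all_false_ne_nil level ‹_›)

-- level[0] (raises on []; those inputs are excluded by Pre_, the .getD 0 is never used there)
def pvHead (level : List Int) : Int := (PySem.List.pyGet? level 0).getD 0

def extrapolate_backwards (sequence : List Int) : Int :=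
  ((sequence :: pvBuild sequence).reverse).foldl (fun v level => pvHead level - v) 0

-- ===== PORT B =====
-- B's pairwise-difference comprehension, written over zip with the tail
def pvDiffsB (l : List Int) : List Int := (l.zip (l.drop 1)).map (fun p => p.2 - p.1)

theorem pvDiffsB_lt (l : List Int) (h : ¬ (l.all (fun v => decide (v = 0)) = true)) :
    (pvDiffsB l).length < l.length := by
  cases l with
  | nil => simp at h
  | cons a t => simp [pvDiffsB]

-- sequence[0] of B's base case (B raises on []; excluded by Pre_)
def extrapolate_backwards_alt (sequence : List Int) : Int :=
  if sequence.all (fun v => decide (v = 0)) then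
    (PySem.List.pyGet? sequence 0).getD 0
  else
    (PySem.List.pyGet? sequence 0).getD 0 - extrapolate_backwards_alt (pvDiffsB sequence)
termination_by sequence.length
decreasing_by exact pvDiffsB_lt sequence ‹_›

-- ===== PRECONDITION & SPEC =====
-- Exactly the inputs on which the Python A returns: the sequence is non-empty and its
-- difference table reaches an all-zero row before running empty, i.e. the (len-1)-th
-- finite difference of the sequence is zero — stated as the alternating binomial sum.
def Pre_extrapolate_backwards (sequence : List Int) : Prop :=
  sequence ≠ [] ∧
    ((sequence.zipIdx).map
      (fun p => (-1 : Int) ^ p.2 * (Nat.choose (sequence.length - 1) p.2 : Int) * p.1)).sum = 0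
instance (sequence : List Int) : Decidable (Pre_extrapolate_backwards sequence) := by
  unfold Pre_extrapolate_backwards; infer_instance

def pvWitness_extrapolate_backwards : List Int := [1, 2, 3]

def Spec_extrapolate_backwards (sequence : List Int) (out : Int) : Prop := out = extrapolate_backwards_alt sequence
instance (sequence : List Int) (out : Int) : Decidable (Spec_extrapolate_backwards sequence out) := by unfold Spec_extrapolate_backwards; infer_instance

-- ===== CLAIM (what is proved, stated in full; the proofs are below) =====
def Claim_equal_extrapolate_backwards : Prop := ∀ (sequence : List Int), Dom_extrapolate_backwards sequence → Pre_extrapolate_backwards sequence → Spec_extrapolate_backwards sequence (extrapolate_backwards sequence)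

-- ===== LEMMAS AND PROOFS =====

theorem pvDiffsB_eq (l : List Int) : pvDiffsB l = pvDiffs l := by
  induction l with
  | nil => rfl
  | cons a t ih =>
    cases t with
    | nil => rfl
    | cons b r => simp [pvDiffsB, pvDiffs] at ih ⊢; exact ih

-- A's value unfolds one level at a time, exactly along B's recursion
theorem extrapolate_step (l : List Int) :
    extrapolate_backwards l =
      if l.all (fun v => decide (v = 0)) then pvHead l
      else pvHead l - extrapolate_backwards (pvDiffs l) := by
  by_cases h : l.all (fun v => decide (v = 0)) = true
  · rw [extrapolate_backwards, pvBuild, if_pos h, if_pos h]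
    simp
  · rw [extrapolate_backwards, pvBuild, if_neg h, if_neg h]
    have : ((l :: pvDiffs l :: pvBuild (pvDiffs l)).reverse) =
        ((pvDiffs l :: pvBuild (pvDiffs l)).reverse) ++ [l] := by simp
    rw [this, List.foldl_append]
    rfl

theorem alt_eq (n : ℕ) (l : List Int) (hn : l.length ≤ n) :
    extrapolate_backwards_alt l = extrapolate_backwards l := by
  induction n generalizing l with
  | zero =>
    have : l = [] := by cases l <;> simp_all
    subst this
    simp [extrapolate_backwards_alt, extrapolate_backwards, pvBuild, pvHead, PySem.List.pyGet?]
  | succ n ih =>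
    rw [extrapolate_step, extrapolate_backwards_alt]
    by_cases h : l.all (fun v => decide (v = 0)) = true
    · simp [h, pvHead]
    · have hne := all_false_ne_nil l h
      have hlt := pvDiffs_lt l hne
      rw [if_neg h, if_neg h, pvDiffsB_eq, ih (pvDiffs l) (by omega)]
      rfl

-- ===== VERDICT (by name: the statement is the Claim_ definition above) =====
theorem extrapolate_backwards_spec : Claim_equal_extrapolate_backwards := by
  intro sequence _ _
  unfold Spec_extrapolate_backwards
  exact (alt_eq sequence.length sequence le_rfl).symm
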